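-- pv_equiv track=rewrite | github.com/KHJun99/SSAFY | study/Tree/Sum_Of_Node/5178.py | find_node_val
-- ===== SOURCE A (Python) =====
-- def find_node_val(tree, L, N):
--     # 범위 밖이면 0
--     if L > N:
--         return 0
--     # 리프(자식 없음)이면 현재 값 반환
--     if L * 2 > N:
--         return tree[L]
--     # 내부 노드: 자식 합으로 채움
--     left = find_node_val(tree, L * 2, N)
--     right = find_node_val(tree, L * 2 + 1, N)
--     tree[L] = left + right
--     return tree[L]
-- ===== SOURCE B (Python) =====
-- def find_node_val(tree, L, N):
--     # Iterative level-interval scan: the subtree of L occupies the index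
--     # interval [lo, hi] at each depth; only leaf indices (i > N // 2) hold
--     # values that contribute, so sum exactly those. Reads the same cells as
--     # the recursion but performs no mutation and visits no internal node.
--     total = 0
--     lo = hi = L
--     while lo <= N:
--         for i in range(max(lo, N // 2 + 1), min(hi, N) + 1):
--             total += tree[i]
--         lo, hi = 2 * lo, 2 * hi + 1
--     return total
-- ===== Notes on version B (the rewrite author's own statement) =====
-- stated objective: alternative
-- what changed: Replaces the mutating top-down recursion (which fills every internal node of L's subtree with child sums) by an iterative level-by-level interval scan [lo,hi] -> [2lo,2hi+1] that sums only the leaf cells (indices i with N//2 < i <= N), with no recursion and no mutation of the list.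
-- outside the precondition, e.g. on find_node_val([1, 2, 3, 4], 3, 5): A returns 4, B returns 4
import Mathlib
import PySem

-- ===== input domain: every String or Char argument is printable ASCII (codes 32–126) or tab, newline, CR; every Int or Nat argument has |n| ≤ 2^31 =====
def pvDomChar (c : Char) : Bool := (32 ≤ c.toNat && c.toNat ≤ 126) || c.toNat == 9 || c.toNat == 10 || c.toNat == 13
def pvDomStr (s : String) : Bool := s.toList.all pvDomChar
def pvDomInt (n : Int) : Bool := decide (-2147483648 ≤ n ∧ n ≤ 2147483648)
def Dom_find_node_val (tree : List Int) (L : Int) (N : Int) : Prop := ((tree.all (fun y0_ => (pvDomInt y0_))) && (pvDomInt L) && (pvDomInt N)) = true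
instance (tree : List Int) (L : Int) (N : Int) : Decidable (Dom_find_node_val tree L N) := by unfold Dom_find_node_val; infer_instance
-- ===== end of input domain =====

-- B replaces the mutating subtree recursion by an iterative per-level interval scan that
-- sums only the leaf cells (alternative decomposition; return value only: Python A
-- overwrites tree[i] at internal nodes of L's subtree, B does not touch the list).

-- ===== PORT A =====
def find_node_val (tree : List Int) (L : Int) (N : Int) : Int :=
  if L > N then 0
  else if L * 2 > N then PySem.List.pyGetD tree L 0   -- tree[L]; Pre_ keeps the index in range (IndexError excluded)
  else if _h : 1 ≤ L then
    -- Python sets tree[L] = left + right and returns tree[L]; the return value is left + right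
    find_node_val tree (L * 2) N + find_node_val tree (L * 2 + 1) N
  else 0   -- totality guard only: Python recurses forever when L ≤ 0 ≤ N (outside Pre_)
termination_by (N + 1 - L).toNat
decreasing_by all_goals omega

-- ===== PORT B =====
-- body of the for-loop level: total += tree[i] for i in range(max(lo, N//2+1), min(hi,N)+1)
def pvLevel (tree : List Int) (N lo hi total : Int) : Int :=
  (PySem.List.pyRange (max lo (PySem.Int.floordiv N 2 + 1)) (min hi N + 1) 1).foldl
    (fun acc i => acc + PySem.List.pyGetD tree i 0) total   -- tree[i]; Pre_ keeps indices in range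

-- the while-loop: while lo <= N: <level>; lo, hi = 2*lo, 2*hi+1
def pvLoop (tree : List Int) (N lo hi total : Int) : Int :=
  if _hle : lo ≤ N then
    if _h1 : 1 ≤ lo then
      pvLoop tree N (2 * lo) (2 * hi + 1) (pvLevel tree N lo hi total)
    else total   -- totality guard only: Python loops forever when lo ≤ 0 ≤ N (outside Pre_)
  else total
termination_by (N + 1 - lo).toNat
decreasing_by omega

def find_node_val_alt (tree : List Int) (L : Int) (N : Int) : Int :=
  pvLoop tree N L L 0

-- ===== PRECONDITION & SPEC =====
-- Pre_ excludes inputs where Python A raises (IndexError on tree[i] with i ≥ len(tree),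
-- or unbounded recursion for L ≤ 0 ≤ N).  The bound N < len(tree) is slightly wider than
-- necessary: on a few shapes with N ≥ len(tree) A still returns (all leaves it touches
-- happen to lie in range) and B returns the same value there.
def Pre_find_node_val (tree : List Int) (L : Int) (N : Int) : Prop :=
  L > N ∨ (1 ≤ L ∧ N < (tree.length : Int))
instance (tree : List Int) (L : Int) (N : Int) : Decidable (Pre_find_node_val tree L N) := by
  unfold Pre_find_node_val; infer_instance

def pvWitness_find_node_val : List Int × Int × Int := ([10, 1, 2, 3], 1, 3)

def Spec_find_node_val (tree : List Int) (L : Int) (N : Int) (out : Int) : Prop := out = find_node_val_alt tree L N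
instance (tree : List Int) (L : Int) (N : Int) (out : Int) : Decidable (Spec_find_node_val tree L N out) := by unfold Spec_find_node_val; infer_instance

-- ===== CLAIM (what is proved, stated in full; the proofs are below) =====
def Claim_equal_find_node_val : Prop := ∀ (tree : List Int) (L : Int) (N : Int), Dom_find_node_val tree L N → Pre_find_node_val tree L N → Spec_find_node_val tree L N (find_node_val tree L N)

-- ===== LEMMAS AND PROOFS =====

-- A returns 0 strictly right of N
theorem pvA_gt (tree : List Int) (N i : Int) (h : N < i) : find_node_val tree i N = 0 := by
  unfold find_node_val; rw [if_pos (by omega)]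

-- one-step unfolding of A valid uniformly for 1 ≤ i, 1 ≤ N:
-- leaf contribution (exactly when N//2 + 1 ≤ i ≤ N) plus the two children
theorem pvA_unfold (tree : List Int) (N i : Int) (hi : 1 ≤ i) (_hN : 1 ≤ N) :
    find_node_val tree i N =
      (if PySem.Int.floordiv N 2 + 1 ≤ i ∧ i ≤ N then PySem.List.pyGetD tree i 0 else 0)
        + (find_node_val tree (i * 2) N + find_node_val tree (i * 2 + 1) N) := by
  have hfd : PySem.Int.floordiv N 2 = N / 2 := PySem.Int.floordiv_eq_ediv_of_pos (by omega)
  rcases (by omega : N < i ∨ i ≤ N) with hgt | hle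
  · rw [pvA_gt tree N i hgt, pvA_gt tree N (i * 2) (by omega), pvA_gt tree N (i * 2 + 1) (by omega)]
    rw [if_neg (by omega)]
    ring
  · rcases (by omega : N < i * 2 ∨ i * 2 ≤ N) with hleaf | hint
    · rw [pvA_gt tree N (i * 2) (by omega), pvA_gt tree N (i * 2 + 1) (by omega)]
      unfold find_node_val
      rw [if_neg (by omega), if_pos (by omega), if_pos (by omega)]
      omega
    · conv_lhs => unfold find_node_val
      rw [if_neg (by omega), if_neg (by omega), dif_pos hi, if_neg (by omega)]
      omega

-- foldl of (acc + f i) is the starting value plus the mapped sum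
theorem pvFoldl_add (f : Int → Int) : ∀ (l : List Int) (t : Int),
    l.foldl (fun acc i => acc + f i) t = t + (l.map f).sum := by
  intro l
  induction l with
  | nil => simp
  | cons x xs ih => intro t; simp [List.foldl, ih]; ring

theorem pvSum_map_add (f g : Int → Int) (l : List Int) :
    (l.map (fun i => f i + g i)).sum = (l.map f).sum + (l.map g).sum := by
  induction l with
  | nil => simp
  | cons x xs ih => simp [ih]; ring

-- summing an interval-guarded function over a range is summing over the clipped range
theorem pvSum_if_interval (f : Int → Int) (c N : Int) : ∀ (n : ℕ) (a b : Int), (b - a).toNat ≤ n →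
    ((PySem.List.pyRange a b 1).map (fun i => if c ≤ i ∧ i ≤ N then f i else 0)).sum
      = ((PySem.List.pyRange (max a c) (min (b - 1) N + 1) 1).map f).sum := by
  intro n
  induction n with
  | zero =>
    intro a b h
    rw [PySem.List.pyRange_one_eq_nil (by omega), PySem.List.pyRange_one_eq_nil (by omega)]
    simp
  | succ n ih =>
    intro a b h
    rcases (by omega : b ≤ a ∨ a < b) with hba | hab
    · rw [PySem.List.pyRange_one_eq_nil (by omega), PySem.List.pyRange_one_eq_nil (by omega)]
      simp
    · rw [PySem.List.pyRange_one_cons hab]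
      simp only [List.map_cons, List.sum_cons]
      rw [ih (a + 1) b (by omega)]
      by_cases hc : c ≤ a ∧ a ≤ N
      · rw [if_pos hc]
        have h1 : max a c = a := by omega
        have h2 : max (a + 1) c = a + 1 := by omega
        rw [h1, h2]
        conv_rhs => rw [PySem.List.pyRange_one_cons (show a < min (b - 1) N + 1 by omega)]
        simp
      · rw [if_neg hc]
        have : PySem.List.pyRange (max a c) (min (b - 1) N + 1) 1
             = PySem.List.pyRange (max (a + 1) c) (min (b - 1) N + 1) 1 := by
          rcases (by omega : c ≤ a ∨ a < c) with hca | hac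
          · -- then a > N: both ranges empty
            rw [PySem.List.pyRange_one_eq_nil (by omega), PySem.List.pyRange_one_eq_nil (by omega)]
          · congr 1; omega
        rw [this]; ring

-- summing g over a doubled range is summing the two children per original index
theorem pvSum_double (g : Int → Int) : ∀ (n : ℕ) (a b : Int), (b - a).toNat ≤ n →
    ((PySem.List.pyRange a b 1).map (fun i => g (i * 2) + g (i * 2 + 1))).sum
      = ((PySem.List.pyRange (a * 2) ((b - 1) * 2 + 2) 1).map g).sum := by
  intro n
  induction n with
  | zero =>
    intro a b h
    rw [PySem.List.pyRange_one_eq_nil (by omega), PySem.List.pyRange_one_eq_nil (by omega)]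
    simp
  | succ n ih =>
    intro a b h
    rcases (by omega : b ≤ a ∨ a < b) with hba | hab
    · rw [PySem.List.pyRange_one_eq_nil (by omega), PySem.List.pyRange_one_eq_nil (by omega)]
      simp
    · rw [PySem.List.pyRange_one_cons hab]
      simp only [List.map_cons, List.sum_cons]
      rw [ih (a + 1) b (by omega)]
      rw [PySem.List.pyRange_one_cons (show a * 2 < (b - 1) * 2 + 2 by omega),
          PySem.List.pyRange_one_cons (show a * 2 + 1 < (b - 1) * 2 + 2 by omega)]
      have : a * 2 + 1 + 1 = (a + 1) * 2 := by ring
      rw [this]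
      simp; ring

-- loop invariant: pvLoop adds the A-values of the whole current interval to the accumulator
theorem pvLoop_eq : ∀ (k : ℕ) (tree : List Int) (N lo hi total : Int), 1 ≤ lo → (N + 1 - lo).toNat ≤ k →
    pvLoop tree N lo hi total
      = total + ((PySem.List.pyRange lo (hi + 1) 1).map (fun i => find_node_val tree i N)).sum := by
  intro k
  induction k with
  | zero =>
    intro tree N lo hi total h1 hk
    unfold pvLoop
    rw [dif_neg (by omega)]
    have hz : ((PySem.List.pyRange lo (hi + 1) 1).map (fun i => find_node_val tree i N)).sum = 0 := by
      apply List.sum_eq_zero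
      intro x hx
      simp only [List.mem_map] at hx
      obtain ⟨i, hi, rfl⟩ := hx
      rw [PySem.List.mem_pyRange_one] at hi
      exact pvA_gt tree N i (by omega)
    omega
  | succ k ih =>
    intro tree N lo hi total h1 hk
    rcases (by omega : lo ≤ N ∨ N < lo) with hle | hgt
    · unfold pvLoop
      rw [dif_pos hle, dif_pos h1]
      rw [ih tree N (2 * lo) (2 * hi + 1) _ (by omega) (by omega)]
      have hsplit : ((PySem.List.pyRange lo (hi + 1) 1).map (fun i => find_node_val tree i N)).sum
          = ((PySem.List.pyRange lo (hi + 1) 1).map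
              (fun i => if PySem.Int.floordiv N 2 + 1 ≤ i ∧ i ≤ N then PySem.List.pyGetD tree i 0 else 0)).sum
            + ((PySem.List.pyRange lo (hi + 1) 1).map
              (fun i => find_node_val tree (i * 2) N + find_node_val tree (i * 2 + 1) N)).sum := by
        rw [← pvSum_map_add]
        congr 1
        apply List.map_congr_left
        intro i hi'
        rw [PySem.List.mem_pyRange_one] at hi'
        exact pvA_unfold tree N i (by omega) (by omega)
      rw [hsplit,
          pvSum_if_interval (fun i => PySem.List.pyGetD tree i 0) (PySem.Int.floordiv N 2 + 1) N
            (hi + 1 - lo).toNat lo (hi + 1) (by omega),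
          pvSum_double (fun i => find_node_val tree i N) (hi + 1 - lo).toNat lo (hi + 1) (by omega)]
      unfold pvLevel
      rw [pvFoldl_add]
      have e : PySem.List.pyRange (2 * lo) (2 * hi + 1 + 1) 1
             = PySem.List.pyRange (lo * 2) (hi * 2 + 2) 1 := by
        rw [show (2 : Int) * lo = lo * 2 by ring, show 2 * hi + 1 + 1 = hi * 2 + 2 by ring]
      rw [e]
      have e2 : min (hi + 1 - 1) N = min hi N := by omega
      rw [e2]
      ring_nf
    · unfold pvLoop
      rw [dif_neg (by omega)]
      have hz : ((PySem.List.pyRange lo (hi + 1) 1).map (fun i => find_node_val tree i N)).sum = 0 := by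
        apply List.sum_eq_zero
        intro x hx
        simp only [List.mem_map] at hx
        obtain ⟨i, hi, rfl⟩ := hx
        rw [PySem.List.mem_pyRange_one] at hi
        exact pvA_gt tree N i (by omega)
      omega

-- ===== VERDICT (by name: the statement is the Claim_ definition above) =====
theorem find_node_val_spec : Claim_equal_find_node_val := by
  intro tree L N _hdom hpre
  unfold Spec_find_node_val find_node_val_alt
  by_cases h1 : 1 ≤ L
  · rw [pvLoop_eq (N + 1 - L).toNat tree N L L 0 h1 (by omega)]
    rw [show L + 1 = L + 1 from rfl, PySem.List.pyRange_one_cons (by omega),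
        PySem.List.pyRange_one_eq_nil (by omega)]
    simp
  · -- then Pre_ forces L > N: both sides are 0
    have hgt : N < L := by rcases hpre with h | h <;> omega
    rw [pvA_gt tree N L hgt]
    unfold pvLoop
    rw [dif_neg (by omega)]
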